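-- pv_equiv track=rewrite | github.com/troutnodoubt/AdventOfCode | 2024/adventofcode2024_day4.py | diag1
-- ===== SOURCE A (Python) =====
-- def diag1(wordsearch):
--     res={}
--     for i in range(len(wordsearch)):
--         for j in range(len(wordsearch)):
--             if i+j not in res.keys():
--                 res[i+j]=wordsearch[i][j]
--             else:
--                 res[i+j]=res[i+j]+wordsearch[i][j]
--     return [*res.values()]
-- ===== SOURCE B (Python) =====
-- def diag1(wordsearch):
--     n = len(wordsearch)
--     return [''.join(wordsearch[i][d - i] for i in range(n) if 0 <= d - i < n)
--             for d in range(2 * n - 1)]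
-- ===== Notes on version B (the rewrite author's own statement) =====
-- stated objective: simpler
-- what changed: Replaces the n*n row-major scan that buckets characters into a dict keyed by i+j with a direct per-diagonal construction: for each anti-diagonal index d, gather its cells wordsearch[i][d-i] in one comprehension; no dict is built.
import Mathlib
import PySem

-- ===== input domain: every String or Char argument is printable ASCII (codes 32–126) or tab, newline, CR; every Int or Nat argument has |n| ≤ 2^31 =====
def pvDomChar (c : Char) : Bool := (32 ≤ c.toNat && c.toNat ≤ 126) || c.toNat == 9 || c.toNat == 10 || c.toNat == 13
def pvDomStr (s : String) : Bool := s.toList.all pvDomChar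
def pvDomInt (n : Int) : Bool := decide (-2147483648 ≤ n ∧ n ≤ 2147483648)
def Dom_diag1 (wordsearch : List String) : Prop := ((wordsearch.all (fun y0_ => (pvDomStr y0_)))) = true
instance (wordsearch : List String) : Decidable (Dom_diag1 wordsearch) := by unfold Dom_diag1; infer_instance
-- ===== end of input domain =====

-- B builds each anti-diagonal directly from its index d instead of bucketing a row-major scan into a dict keyed by i+j (objective: simpler).

-- ===== PORT A =====
-- dict keyed by i+j (values kept as List Char; String.ofList only wraps at the very end)
def diag1 (wordsearch : List String) : List String :=
  let n : Int := (wordsearch.length : Int)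
  let res : PySem.Dict Int (List Char) :=
    (PySem.List.pyRange 0 n 1).foldl (fun res i =>
      (PySem.List.pyRange 0 n 1).foldl (fun res j =>
        if res.contains (i + j) = false then
          res.insert (i + j) [PySem.List.pyGetD (PySem.List.pyGetD wordsearch i "").toList j ' ']
        else
          res.insert (i + j)
            (res.getD (i + j) [] ++ [PySem.List.pyGetD (PySem.List.pyGetD wordsearch i "").toList j ' '])) res)
      PySem.Dict.empty
  res.values.map String.ofList

-- ===== PORT B =====
def diag1_alt (wordsearch : List String) : List String :=
  let n : Int := (wordsearch.length : Int)
  (PySem.List.pyRange 0 (2 * n - 1) 1).map (fun d =>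
    String.ofList (((PySem.List.pyRange 0 n 1).filter (fun i => decide (0 ≤ d - i) && decide (d - i < n))).map
      (fun i => PySem.List.pyGetD (PySem.List.pyGetD wordsearch i "").toList (d - i) ' ')))

-- ===== PRECONDITION & SPEC =====
-- Pre_ excludes exactly the ragged grids on which Python's wordsearch[i][j] raises IndexError
-- (a row shorter than the number of rows); on every other input A returns normally.
def Pre_diag1 (wordsearch : List String) : Prop :=
  ∀ s ∈ wordsearch, wordsearch.length ≤ s.toList.length
instance (wordsearch : List String) : Decidable (Pre_diag1 wordsearch) := by unfold Pre_diag1; infer_instance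

def pvWitness_diag1 : List String := ["abc", "def", "ghi"]

def Spec_diag1 (wordsearch : List String) (out : List String) : Prop := out = diag1_alt wordsearch
instance (wordsearch : List String) (out : List String) : Decidable (Spec_diag1 wordsearch out) := by unfold Spec_diag1; infer_instance

-- ===== CLAIM (what is proved, stated in full; the proofs are below) =====
def Claim_equal_diag1 : Prop := ∀ (wordsearch : List String), Dom_diag1 wordsearch → Pre_diag1 wordsearch → Spec_diag1 wordsearch (diag1 wordsearch)

-- ===== LEMMAS AND PROOFS =====

-- the character A and B both read at cell (i, j) (a default that Pre_ keeps unreachable out of range)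
def pvCell (ws : List String) (i j : Nat) : Char := ((ws.getD i "").toList).getD j ' '

-- the contents of anti-diagonal d after the first i rows have been scanned
def pvChars (ws : List String) (i d : Nat) : List Char :=
  ((List.range i).filter (fun t => decide (t ≤ d) && decide (d - t < ws.length))).map
    (fun t => pvCell ws t (d - t))

-- number of dict keys after the first i rows have been scanned
def pvBound (n i : Nat) : Nat := if i = 0 then 0 else n + i - 1

-- the dict state: keys 0..m-1 in order, value f d at key d
def pvMk (f : Nat → List Char) (m : Nat) : PySem.Dict Int (List Char) :=
  ⟨(List.range m).map (fun (d : Nat) => ((d : Int), f d))⟩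

theorem pvMk_congr (f g : Nat → List Char) (m : Nat) (h : ∀ d < m, f d = g d) :
    pvMk f m = pvMk g m := by
  unfold pvMk
  have : (List.range m).map (fun (d : Nat) => ((d : Int), f d)) = (List.range m).map (fun (d : Nat) => ((d : Int), g d)) := by
    apply List.map_congr_left
    intro d hd
    rw [h d (List.mem_range.mp hd)]
  rw [this]

theorem find?_pvMk_of_lt (f : Nat → List Char) (m k : Nat) (hk : k < m) :
    List.find? (fun p => p.1 == (k : Int)) ((List.range m).map (fun (d : Nat) => ((d : Int), f d)))
      = some ((k : Int), f k) := by
  induction m with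
  | zero => omega
  | succ m ih =>
    rw [List.range_succ, List.map_append, List.find?_append]
    rcases Nat.lt_or_ge k m with h | h
    · rw [ih h]; rfl
    · have hk' : k = m := by omega
      subst hk'
      have : List.find? (fun p => p.1 == (k : Int)) ((List.range k).map (fun (d : Nat) => ((d : Int), f d))) = none := by
        apply List.find?_eq_none.mpr
        intro p hp
        simp only [List.mem_map, List.mem_range] at hp
        obtain ⟨d, hd, rfl⟩ := hp
        simp only [beq_iff_eq, Int.natCast_inj]
        omega
      rw [this]
      simp

theorem contains_pvMk (f : Nat → List Char) (m k : Nat) :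
    (pvMk f m).contains ((k : Int)) = decide (k < m) := by
  unfold pvMk PySem.Dict.contains
  rw [List.any_map]
  by_cases h : k < m
  · rw [decide_eq_true h]
    exact List.any_eq_true.mpr ⟨k, List.mem_range.mpr h, by simp⟩
  · rw [decide_eq_false h]
    apply List.any_eq_false.mpr
    intro d hd
    simp only [List.mem_range] at hd
    simp only [Function.comp, beq_iff_eq, Int.natCast_inj]
    omega

theorem getD_pvMk_of_lt (f : Nat → List Char) (m k : Nat) (hk : k < m) :
    (pvMk f m).getD ((k : Int)) [] = f k := by
  unfold pvMk PySem.Dict.getD PySem.Dict.get?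
  rw [find?_pvMk_of_lt f m k hk]
  rfl

theorem insert_pvMk_of_lt (f : Nat → List Char) (m k : Nat) (v : List Char) (hk : k < m) :
    (pvMk f m).insert ((k : Int)) v = pvMk (fun d => if d = k then v else f d) m := by
  unfold PySem.Dict.insert
  rw [contains_pvMk f m k, decide_eq_true hk]
  simp only [if_true]
  unfold pvMk
  congr 1
  rw [List.map_map]
  apply List.map_congr_left
  intro d hd
  simp only [Function.comp, beq_iff_eq, Int.natCast_inj]
  by_cases h : d = k
  · subst h; simp
  · simp [h]

theorem insert_pvMk_self (f : Nat → List Char) (m : Nat) (v : List Char) :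
    (pvMk f m).insert ((m : Int)) v = pvMk (fun d => if d = m then v else f d) (m + 1) := by
  unfold PySem.Dict.insert
  rw [contains_pvMk f m m, decide_eq_false (by omega)]
  simp only [Bool.false_eq_true, if_false]
  unfold pvMk
  congr 1
  rw [List.range_succ, List.map_append]
  congr 1
  · apply List.map_congr_left
    intro d hd
    simp only [List.mem_range] at hd
    simp only []
    rw [if_neg (by omega)]
  · simp

theorem pvChars_eq_nil (ws : List String) (i d : Nat) (hd : pvBound ws.length i ≤ d) :
    pvChars ws i d = [] := by
  unfold pvChars
  rw [List.filter_eq_nil_iff.mpr, List.map_nil]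
  intro t ht
  simp only [List.mem_range] at ht
  unfold pvBound at hd
  by_cases h0 : i = 0
  · omega
  · rw [if_neg h0] at hd
    simp only [Bool.and_eq_true, decide_eq_true_eq, not_and]
    intro _
    omega

-- one write of the inner loop, on the normalized dict state
theorem pvInner_step (ws : List String) (i j : Nat) (_hj : j < ws.length) :
    (fun res => if PySem.Dict.contains res ((i : Int) + (j : Int)) = false then
        res.insert ((i : Int) + (j : Int)) [PySem.List.pyGetD (PySem.List.pyGetD ws (i : Int) "").toList (j : Int) ' ']
      else
        res.insert ((i : Int) + (j : Int))
          (res.getD ((i : Int) + (j : Int)) [] ++ [PySem.List.pyGetD (PySem.List.pyGetD ws (i : Int) "").toList (j : Int) ' ']))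
      (pvMk (fun d => pvChars ws i d ++ (if i ≤ d ∧ d < i + j then [pvCell ws i (d - i)] else []))
        (max (pvBound ws.length i) (i + j)))
    = pvMk (fun d => pvChars ws i d ++ (if i ≤ d ∧ d < i + j + 1 then [pvCell ws i (d - i)] else []))
        (max (pvBound ws.length i) (i + j + 1)) := by
  have hcell : PySem.List.pyGetD (PySem.List.pyGetD ws (i : Int) "").toList (j : Int) ' ' = pvCell ws i j := by
    rw [PySem.List.pyGetD_natCast, PySem.List.pyGetD_natCast]
    rfl
  have hcast : (i : Int) + (j : Int) = ((i + j : Nat) : Int) := by push_cast; ring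
  set m := max (pvBound ws.length i) (i + j) with hm
  rcases Nat.lt_or_ge (i + j) m with hlt | hge
  · -- key already present: overwrite in place
    have hb : i + j < pvBound ws.length i := by omega
    have hmax : max (pvBound ws.length i) (i + j + 1) = m := by omega
    simp only [hcast, contains_pvMk, decide_eq_true hlt]
    simp only [Bool.true_eq_false, if_false, getD_pvMk_of_lt _ m (i + j) hlt,
      insert_pvMk_of_lt _ m (i + j) _ hlt, hmax, hcell]
    apply pvMk_congr
    intro d hd
    by_cases h : d = i + j
    · subst h
      rw [if_pos rfl, if_neg (by omega), if_pos (by omega)]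
      simp
    · rw [if_neg h]
      by_cases h2 : i ≤ d ∧ d < i + j
      · rw [if_pos h2, if_pos ⟨h2.1, by omega⟩]
      · rw [if_neg h2, if_neg (by omega)]
  · -- key is new: append
    have hmeq : m = i + j := by omega
    have hmax : max (pvBound ws.length i) (i + j + 1) = m + 1 := by omega
    have hcont : (pvMk (fun d => pvChars ws i d ++ (if i ≤ d ∧ d < i + j then [pvCell ws i (d - i)] else [])) (i + j)).contains (((i + j : Nat) : Int)) = false := by
      rw [contains_pvMk]; simp
    rw [hcast, hmeq]
    simp only []
    rw [if_pos hcont, insert_pvMk_self, hcell, hmax, hmeq]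
    apply pvMk_congr
    intro d hd
    by_cases h : d = i + j
    · subst h
      rw [if_pos rfl, if_pos (by omega), pvChars_eq_nil ws i (i + j) (by omega)]
      simp
    · rw [if_neg h]
      by_cases h2 : i ≤ d ∧ d < i + j
      · rw [if_pos h2, if_pos ⟨h2.1, by omega⟩]
      · rw [if_neg h2, if_neg (by omega)]

-- the whole inner loop over row i
theorem pvInner (ws : List String) (i : Nat) (hi : i < ws.length) :
    (PySem.List.pyRange 0 (ws.length : Int) 1).foldl (fun res j =>
        if PySem.Dict.contains res ((i : Int) + j) = false then
          res.insert ((i : Int) + j) [PySem.List.pyGetD (PySem.List.pyGetD ws (i : Int) "").toList j ' ']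
        else
          res.insert ((i : Int) + j)
            (res.getD ((i : Int) + j) [] ++ [PySem.List.pyGetD (PySem.List.pyGetD ws (i : Int) "").toList j ' ']))
      (pvMk (pvChars ws i) (pvBound ws.length i))
    = pvMk (pvChars ws (i + 1)) (pvBound ws.length (i + 1)) := by
  have key : ∀ j : Nat, j ≤ ws.length →
      (PySem.List.pyRange 0 ((j : Nat) : Int) 1).foldl (fun res j =>
        if PySem.Dict.contains res ((i : Int) + j) = false then
          res.insert ((i : Int) + j) [PySem.List.pyGetD (PySem.List.pyGetD ws (i : Int) "").toList j ' ']
        else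
          res.insert ((i : Int) + j)
            (res.getD ((i : Int) + j) [] ++ [PySem.List.pyGetD (PySem.List.pyGetD ws (i : Int) "").toList j ' ']))
        (pvMk (pvChars ws i) (pvBound ws.length i))
      = pvMk (fun d => pvChars ws i d ++ (if i ≤ d ∧ d < i + j then [pvCell ws i (d - i)] else []))
          (max (pvBound ws.length i) (i + j)) := by
    intro j
    induction j with
    | zero =>
      intro _
      simp only [Nat.cast_zero, PySem.List.pyRange_zero, Int.toNat_zero, List.range_zero,
        List.map_nil, List.foldl_nil]
      rw [Nat.max_eq_left (by unfold pvBound; split <;> omega)]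
      apply pvMk_congr
      intro d hd
      rw [if_neg (by omega)]
      simp
    | succ j ih =>
      intro hle
      have hc : ((j + 1 : Nat) : Int) = ((j : Nat) : Int) + 1 := by push_cast; ring
      rw [hc, PySem.List.pyRange_one_succ_right (by positivity), List.foldl_append,
        List.foldl_cons, List.foldl_nil, ih (by omega)]
      exact pvInner_step ws i j (by omega)
  rw [key ws.length le_rfl]
  have hb : max (pvBound ws.length i) (i + ws.length) = pvBound ws.length (i + 1) := by
    unfold pvBound; split <;> split <;> omega
  rw [hb]
  apply pvMk_congr
  intro d hd
  unfold pvChars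
  rw [List.range_succ, List.filter_append, List.map_append]
  congr 1
  by_cases h : i ≤ d ∧ d < i + ws.length
  · rw [if_pos h]
    have hp : (fun t => decide (t ≤ d) && decide (d - t < ws.length)) i = true := by
      simp only [Bool.and_eq_true, decide_eq_true_eq]; omega
    simp [hp]
  · rw [if_neg h]
    have hp : (fun t => decide (t ≤ d) && decide (d - t < ws.length)) i = false := by
      simp only [Bool.and_eq_false_iff, decide_eq_false_iff_not]; omega
    simp [hp]

-- the outer loop: scanning all n rows yields the fully populated dict
theorem pvOuter (ws : List String) :
    (PySem.List.pyRange 0 (ws.length : Int) 1).foldl (fun res i =>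
      (PySem.List.pyRange 0 (ws.length : Int) 1).foldl (fun res j =>
        if PySem.Dict.contains res (i + j) = false then
          res.insert (i + j) [PySem.List.pyGetD (PySem.List.pyGetD ws i "").toList j ' ']
        else
          res.insert (i + j)
            (res.getD (i + j) [] ++ [PySem.List.pyGetD (PySem.List.pyGetD ws i "").toList j ' '])) res)
      PySem.Dict.empty
    = pvMk (pvChars ws ws.length) (pvBound ws.length ws.length) := by
  have key : ∀ i : Nat, i ≤ ws.length →
      (PySem.List.pyRange 0 ((i : Nat) : Int) 1).foldl (fun res i =>
        (PySem.List.pyRange 0 (ws.length : Int) 1).foldl (fun res j =>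
          if PySem.Dict.contains res (i + j) = false then
            res.insert (i + j) [PySem.List.pyGetD (PySem.List.pyGetD ws i "").toList j ' ']
          else
            res.insert (i + j)
              (res.getD (i + j) [] ++ [PySem.List.pyGetD (PySem.List.pyGetD ws i "").toList j ' '])) res)
        PySem.Dict.empty
      = pvMk (pvChars ws i) (pvBound ws.length i) := by
    intro i
    induction i with
    | zero =>
      intro _
      simp only [Nat.cast_zero, PySem.List.pyRange_zero, Int.toNat_zero, List.range_zero,
        List.map_nil, List.foldl_nil]
      rfl
    | succ i ih =>
      intro hle
      have hc : ((i + 1 : Nat) : Int) = ((i : Nat) : Int) + 1 := by push_cast; ring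
      rw [hc, PySem.List.pyRange_one_succ_right (by positivity), List.foldl_append,
        List.foldl_cons, List.foldl_nil, ih (by omega)]
      exact pvInner ws i (by omega)
  exact key ws.length le_rfl

-- B's inner gather for diagonal d equals pvChars at i = n
theorem pvAlt_entry (ws : List String) (d : Nat) :
    ((PySem.List.pyRange 0 (ws.length : Int) 1).filter
        (fun i => decide (0 ≤ (d : Int) - i) && decide ((d : Int) - i < (ws.length : Int)))).map
      (fun i => PySem.List.pyGetD (PySem.List.pyGetD ws i "").toList ((d : Int) - i) ' ')
    = pvChars ws ws.length d := by
  rw [PySem.List.pyRange_zero_nat, List.filter_map, List.map_map]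
  unfold pvChars
  have hf : (List.range ws.length).filter ((fun i => decide (0 ≤ (d : Int) - i) && decide ((d : Int) - i < (ws.length : Int))) ∘ (fun k : Nat => (k : Int)))
      = (List.range ws.length).filter (fun t => decide (t ≤ d) && decide (d - t < ws.length)) := by
    apply List.filter_congr
    intro t _
    simp only [Function.comp]
    by_cases h1 : t ≤ d
    · have : (d : Int) - (t : Int) = ((d - t : Nat) : Int) := by omega
      simp only [this]
      have h1' : (0 : Int) ≤ ((d - t : Nat) : Int) := by positivity
      simp only [decide_eq_true h1, decide_eq_true h1', Bool.true_and]
      congr 1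
      simp only [Nat.cast_lt]
    · have h1' : ¬ ((0 : Int) ≤ (d : Int) - (t : Int)) := by omega
      simp only [decide_eq_false h1, decide_eq_false h1', Bool.false_and]
  rw [hf]
  apply List.map_congr_left
  intro t ht
  simp only [List.mem_filter, List.mem_range, Bool.and_eq_true, decide_eq_true_eq] at ht
  simp only [Function.comp]
  have : (d : Int) - (t : Int) = ((d - t : Nat) : Int) := by omega
  rw [this, PySem.List.pyGetD_natCast, PySem.List.pyGetD_natCast]
  rfl

-- 2n-1 clamped at 0 is exactly pvBound n n
theorem pvRange_bound (n : Nat) :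
    PySem.List.pyRange 0 (2 * (n : Int) - 1) 1 = (List.range (pvBound n n)).map (fun k : Nat => (k : Int)) := by
  rw [PySem.List.pyRange_one]
  have : (2 * (n : Int) - 1 - 0).toNat = pvBound n n := by
    unfold pvBound; split <;> omega
  rw [this]
  simp

-- ===== VERDICT (by name: the statement is the Claim_ definition above) =====
theorem diag1_spec : Claim_equal_diag1 := by
  intro ws _ _
  unfold Spec_diag1 diag1 diag1_alt
  simp only []
  rw [pvOuter ws, pvRange_bound ws.length]
  unfold pvMk PySem.Dict.values
  simp only [List.map_map]
  apply List.map_congr_left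
  intro d hd
  simp only [Function.comp]
  rw [pvAlt_entry ws d]
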